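-- pv_equiv track=rewrite | github.com/smeinecke/froxlor-migrator | froxlor_migrator/migration/core.py | _relative_customer_path
-- ===== SOURCE A (Python) =====
-- def _relative_customer_path(path: str, customer_login: str) -> str:
--     cleaned = path.strip().strip("/")
--     if not cleaned:
--         return ""
--     marker = f"/{customer_login.strip('/')}/"
--     lowered = cleaned.lower()
--     if marker.lower() in f"/{lowered}/":
--         original = cleaned
--         while marker in f"/{original}/":
--             if marker in original:
--                 original = original.split(marker, 1)[1].strip("/")
--             else:
--                 break
--         cleaned = original
--     if cleaned.startswith(customer_login.strip("/") + "/"):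
--         cleaned = cleaned[len(customer_login.strip("/")) + 1 :]
--     return cleaned
-- ===== SOURCE B (Python) =====
-- def _relative_customer_path(path: str, customer_login: str) -> str:
--     login = customer_login.strip("/")
--     marker = "/" + login + "/"
--     cleaned = path.strip().strip("/")
--     n = len(cleaned)
--     m = len(marker)
--     # all positions where the marker matches, found in one scan
--     occs = [i for i in range(n) if cleaned[i:i + m] == marker]
--     start = 0
--     for p in occs:
--         if p >= start:
--             start = p + m
--             while start < n and cleaned[start] == "/":
--                 start += 1
--     cleaned = cleaned[start:]
--     if cleaned.startswith(login + "/"):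
--         cleaned = cleaned[len(login) + 1:]
--     return cleaned
-- ===== Notes on version B (the rewrite author's own statement) =====
-- stated objective: alternative
-- what changed: Replaced A's while-loop of repeated split(marker,1)/strip string reconstructions by a single scan that records all marker match positions up front and then a fold over those positions with pure index arithmetic (advance past the match, skip slashes), slicing the string only once at the end; A's case-insensitive pre-check is provably redundant and dropped.
import Mathlib
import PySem

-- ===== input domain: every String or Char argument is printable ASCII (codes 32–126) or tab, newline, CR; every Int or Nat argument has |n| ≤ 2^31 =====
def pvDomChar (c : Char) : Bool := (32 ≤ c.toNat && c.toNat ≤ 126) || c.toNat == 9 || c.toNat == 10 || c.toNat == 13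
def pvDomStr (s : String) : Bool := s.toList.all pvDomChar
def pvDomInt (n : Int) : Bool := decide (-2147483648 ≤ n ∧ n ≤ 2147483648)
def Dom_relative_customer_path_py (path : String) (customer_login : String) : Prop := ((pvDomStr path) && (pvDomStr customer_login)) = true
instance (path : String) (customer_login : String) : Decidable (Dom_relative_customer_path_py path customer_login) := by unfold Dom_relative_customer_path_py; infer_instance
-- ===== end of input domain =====

-- B replaces A's while-loop of repeated split/strip string reconstructions by one scan that
-- collects all marker match positions, then a fold over those positions with index arithmetic,
-- slicing only once at the end; objective: alternative (A's case-insensitive guard is redundant).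

-- ===== PORT A =====
-- while marker in f"/{original}/": if marker in original: original = original.split(marker, 1)[1].strip("/") else: break
-- fuel is a totality guard only (each executed iteration strictly shortens the string).
-- original.split(marker, 1)[1] is ported as pyGet? 1 on PySem.Str.splitMax?; the .getD fallbacks are
-- unreachable (the branch is guarded by `marker in original`, so the split has a second part).
def pyLoopA (marker : String) (fuel : Nat) (original : String) : String :=
  match fuel with
  | 0 => original
  | fuel + 1 =>
    if PySem.Str.isIn marker ("/" ++ original ++ "/") then
      if PySem.Str.isIn marker original then
        pyLoopA marker fuel
          (PySem.Str.stripChars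
            ((PySem.List.pyGet? ((PySem.Str.splitMax? original marker 1).getD []) 1).getD "") "/")
      else original
    else original

def relative_customer_path_py (path : String) (customer_login : String) : String :=
  let cleaned := PySem.Str.stripChars (PySem.Str.strip path) "/"
  if cleaned = "" then ""
  else
    let marker := "/" ++ PySem.Str.stripChars customer_login "/" ++ "/"
    let lowered := PySem.Str.lower cleaned
    let cleaned1 :=
      if PySem.Str.isIn (PySem.Str.lower marker) ("/" ++ lowered ++ "/") then
        pyLoopA marker (cleaned.toList.length + 1) cleaned
      else cleaned
    if PySem.Str.startswith cleaned1 (PySem.Str.stripChars customer_login "/" ++ "/") then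
      PySem.Str.slice cleaned1 (some (PySem.Str.len (PySem.Str.stripChars customer_login "/") + 1)) none
    else cleaned1

-- ===== PORT B =====
-- while start < n and cleaned[start] == "/": start += 1   (indexing cleaned[start] is in range here,
-- ported as list indexing on the code points)
def skipSlash (l : List Char) (start : Nat) : Nat :=
  if h : start < l.length ∧ l[start]? = some '/' then skipSlash l (start + 1) else start
  termination_by l.length - start
  decreasing_by exact Nat.sub_succ_lt_self _ _ h.1

-- occs = [i for i in range(n) if cleaned[i:i+m] == marker]; then the for-loop over occs is a foldl;
-- cleaned[start:] and the final prefix drop are slices.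
def relative_customer_path_py_alt (path : String) (customer_login : String) : String :=
  let login := PySem.Str.stripChars customer_login "/"
  let marker := "/" ++ login ++ "/"
  let cleaned := PySem.Str.stripChars (PySem.Str.strip path) "/"
  let n := cleaned.toList.length
  let m := marker.toList.length
  let occs := (List.range n).filter
    (fun (i : Nat) => PySem.Str.slice cleaned (some (i : Int)) (some ((i : Int) + (m : Int))) == marker)
  let start := occs.foldl (fun start p => if start ≤ p then skipSlash cleaned.toList (p + m) else start) 0
  let cleaned1 := PySem.Str.slice cleaned (some (start : Int)) none
  if PySem.Str.startswith cleaned1 (login ++ "/") then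
    PySem.Str.slice cleaned1 (some (PySem.Str.len login + 1)) none
  else cleaned1

-- ===== PRECONDITION & SPEC =====
def Spec_relative_customer_path_py (path : String) (customer_login : String) (out : String) : Prop := out = relative_customer_path_py_alt path customer_login
instance (path : String) (customer_login : String) (out : String) : Decidable (Spec_relative_customer_path_py path customer_login out) := by unfold Spec_relative_customer_path_py; infer_instance

-- ===== CLAIM (what is proved, stated in full; the proofs are below) =====
def Claim_equal_relative_customer_path_py : Prop := ∀ (path : String) (customer_login : String), Dom_relative_customer_path_py path customer_login → Spec_relative_customer_path_py path customer_login (relative_customer_path_py path customer_login)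

-- ===== LEMMAS AND PROOFS =====

theorem go_m_zero (sep : List Char) : ∀ (fuel : Nat) (l cur : List Char) (acc : List (List Char)),
    PySem.Chars.splitOnMax.go sep fuel 0 l cur acc = ((cur.reverse ++ l) :: acc).reverse := by
  intro fuel l cur acc
  match fuel, l with
  | 0, l => rw [PySem.Chars.splitOnMax.go.eq_def]
  | fuel+1, [] => rw [PySem.Chars.splitOnMax.go.eq_def]; simp
  | fuel+1, c :: rest => rw [PySem.Chars.splitOnMax.go.eq_def]; simp

theorem find_of_prefix {l sep : List Char} (h : sep <+: l) : PySem.Chars.find l sep = 0 := by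
  have hinf : sep <:+: l := h.isInfix
  have h0 : 0 ≤ PySem.Chars.find l sep := (PySem.Chars.find_nonneg_iff _ _).2 hinf
  obtain ⟨_, hmin⟩ := PySem.Chars.find_spec h0
  by_contra hne
  have : 0 < (PySem.Chars.find l sep).toNat := by omega
  exact hmin 0 this (by simpa using h)

theorem find_cons_of_infix {c : Char} {rest sep : List Char}
    (hnp : ¬ sep <+: (c :: rest)) (hinf : sep <:+: rest) :
    PySem.Chars.find (c :: rest) sep = PySem.Chars.find rest sep + 1 := by
  have h0r : 0 ≤ PySem.Chars.find rest sep := (PySem.Chars.find_nonneg_iff _ _).2 hinf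
  have h0 : 0 ≤ PySem.Chars.find (c :: rest) sep :=
    (PySem.Chars.find_nonneg_iff _ _).2 (hinf.trans (List.suffix_cons c rest).isInfix)
  obtain ⟨hp, hmin⟩ := PySem.Chars.find_spec h0
  obtain ⟨hpr, hminr⟩ := PySem.Chars.find_spec h0r
  set n := (PySem.Chars.find (c :: rest) sep).toNat with hn
  set m := (PySem.Chars.find rest sep).toNat with hm
  have hn0 : n ≠ 0 := by
    intro h0'
    rw [h0'] at hp; exact hnp (by simpa using hp)
  have h1 : n ≤ m + 1 := by
    by_contra hgt
    exact (hmin (m+1) (by omega)) (by simpa [List.drop_succ_cons] using hpr)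
  have h2 : m ≤ n - 1 := by
    by_contra hgt
    have := hminr (n-1) (by omega)
    apply this
    have hd : sep <+: List.drop n (c :: rest) := hp
    rw [show n = (n-1)+1 by omega] at hd
    simpa [List.drop_succ_cons] using hd
  omega

theorem go_spec (sep : List Char) (hsep : sep ≠ []) :
    ∀ (fuel : Nat) (l cur : List Char) (acc : List (List Char)), l.length < fuel → sep <:+: l →
      PySem.Chars.splitOnMax.go sep fuel 1 l cur acc
        = acc.reverse ++ [cur.reverse ++ l.take (PySem.Chars.find l sep).toNat,
            l.drop ((PySem.Chars.find l sep).toNat + sep.length)] := by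
  intro fuel
  induction fuel with
  | zero => intro l cur acc h; omega
  | succ fuel ih =>
    intro l cur acc hlen hinf
    match l with
    | [] =>
      exact absurd (List.sublist_nil.1 hinf.sublist) hsep
    | c :: rest =>
      rw [PySem.Chars.splitOnMax.go.eq_def]
      norm_num
      by_cases hpre : sep <+: (c :: rest)
      · rw [if_pos hpre, go_m_zero]
        rw [find_of_prefix hpre]
        simp
      · rw [if_neg hpre]
        have hinfr : sep <:+: rest := by
          rcases List.infix_cons_iff.1 hinf with h | h
          · exact absurd h hpre
          · exact h
        rw [ih rest (c :: cur) acc (by simpa using Nat.lt_of_succ_lt_succ hlen) hinfr]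
        have hf := find_cons_of_infix hpre hinfr
        have h0r : 0 ≤ PySem.Chars.find rest sep := (PySem.Chars.find_nonneg_iff _ _).2 hinfr
        rw [hf]
        have : (PySem.Chars.find rest sep + 1).toNat = (PySem.Chars.find rest sep).toNat + 1 := by omega
        rw [this]
        rw [show (PySem.Chars.find rest sep).toNat + 1 + sep.length
              = ((PySem.Chars.find rest sep).toNat + sep.length) + 1 by omega,
            List.drop_succ_cons]
        simp [List.take_succ_cons]

-- A's split(marker, 1)[1] equals the slice after the first occurrence.
theorem tail_eq (s marker : String) (hm : marker.toList ≠ [])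
    (hinf : marker.toList <:+: s.toList) :
    (PySem.List.pyGet? ((PySem.Str.splitMax? s marker 1).getD []) 1).getD ""
      = PySem.Str.slice s (some (PySem.Str.find s marker + PySem.Str.len marker)) none := by
  have h0 : 0 ≤ PySem.Chars.find s.toList marker.toList :=
    (PySem.Chars.find_nonneg_iff _ _).2 hinf
  have hsplit : PySem.Chars.splitOnMax s.toList marker.toList 1
      = [List.take (PySem.Chars.find s.toList marker.toList).toNat s.toList,
         List.drop ((PySem.Chars.find s.toList marker.toList).toNat + marker.toList.length) s.toList] := by
    unfold PySem.Chars.splitOnMax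
    rw [if_neg (by norm_num)]
    rw [show ((1 : Int)).toNat = 1 from rfl]
    rw [go_spec marker.toList hm _ _ _ _ (by omega) hinf]
    simp
  unfold PySem.Str.splitMax? PySem.Chars.splitMax?
  rw [if_neg (by simpa using hm)]
  rw [hsplit]
  have hfe : PySem.Str.find s marker = PySem.Chars.find s.toList marker.toList := by simp
  have hle : PySem.Str.len marker = (marker.toList.length : Int) := by simp
  unfold PySem.Str.slice
  simp only [PySem.Chars.slice_eq_listSlice]
  rw [hfe, hle, PySem.List.slice_from s.toList (by omega)]
  simp [PySem.List.pyGet?, PySem.List.pyIdx?]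
  simp only [show marker.length = marker.toList.length from rfl]
  congr 2
  omega

-- an infix embeds into the slash-wrapped string
theorem infix_wrapped {sub s : List Char} (h : sub <:+: s) :
    sub <:+: '/' :: (s ++ ['/']) :=
  h.trans ⟨['/'], ['/'], by simp⟩

-- lowering preserves infixes (and maps the wrap to the wrap)
theorem lower_wrapped {sub s : List Char} (h : sub <:+: s) :
    PySem.Chars.lower sub <:+: '/' :: (PySem.Chars.lower s ++ ['/']) := by
  have hmap := List.IsInfix.map PySem.Chars.lowerChar h
  have hmap' : PySem.Chars.lower sub <:+: PySem.Chars.lower s := by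
    simpa [PySem.Chars.lower] using hmap
  exact hmap'.trans ⟨['/'], ['/'], by simp⟩

-- head of a dropWhile does not satisfy the predicate
theorem head?_dropWhile_false {p : Char → Bool} : ∀ (w : List Char) {c : Char},
    (List.dropWhile p w).head? = some c → p c = false := by
  intro w
  induction w with
  | nil => intro c h; simp at h
  | cons a t ih =>
    intro c h
    by_cases ha : p a
    · rw [List.dropWhile_cons_of_pos ha] at h; exact ih h
    · rw [List.dropWhile_cons_of_neg ha] at h
      simp at h
      rw [← h]
      simpa using ha

-- strip of a string with no trailing slash only drops leading slashes
theorem stripChars_noTrail (s : List Char) (h : s.getLast? ≠ some '/') :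
    PySem.Chars.stripChars s ['/'] = s.dropWhile (fun c => (['/'] : List Char).contains c) := by
  have hdef : PySem.Chars.stripChars s ['/']
      = (List.dropWhile (fun c => (['/'] : List Char).contains c)
          (List.dropWhile (fun c => (['/'] : List Char).contains c) s).reverse).reverse := rfl
  rw [hdef]
  set p : Char → Bool := fun c => (['/'] : List Char).contains c with hp
  set t := List.dropWhile p s with ht
  have htsuf : t <:+ s := List.dropWhile_suffix p
  match hcase : t.reverse with
  | [] =>
    have ht0 : t = [] := by simpa using congrArg List.reverse hcase
    rw [ht0]
    rfl
  | c :: u =>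
    have hc : t.getLast? = some c := by
      rw [← List.head?_reverse, hcase]; rfl
    have hcs : s.getLast? = some c := by
      obtain ⟨pre, hpre⟩ := htsuf
      rw [← hpre, List.getLast?_append_of_ne_nil pre, hc]
      intro ht0; rw [ht0] at hc; simp at hc
    have hcne : c ≠ '/' := by intro he; rw [he] at hcs; exact h hcs
    have hpc : ¬ p c = true := by
      rw [hp]
      simp only [List.contains_cons, List.contains_nil, Bool.or_false, beq_iff_eq]
      simpa using hcne
    rw [List.dropWhile_cons_of_neg hpc, ← hcase]
    simp

-- the result of stripChars by '/' never ends in '/'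
theorem getLast?_stripChars (s : List Char) :
    (PySem.Chars.stripChars s ['/']).getLast? ≠ some '/' := by
  have hdef : PySem.Chars.stripChars s ['/']
      = (List.dropWhile (fun c => (['/'] : List Char).contains c)
          (List.dropWhile (fun c => (['/'] : List Char).contains c) s).reverse).reverse := rfl
  rw [hdef]
  intro h
  rw [List.getLast?_reverse] at h
  have := head?_dropWhile_false _ h
  simp only [List.contains_cons, List.contains_nil, Bool.or_false] at this
  simp at this

theorem getLast?_drop {l : List Char} (j : Nat) (h : l.getLast? ≠ some '/') :
    (l.drop j).getLast? ≠ some '/' := by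
  match hcase : l.drop j with
  | [] => simp
  | c :: u =>
    have hsuf : (c :: u) <:+ l := hcase ▸ List.drop_suffix j l
    obtain ⟨pre, hpre⟩ := hsuf
    rw [← hpre] at h
    rw [List.getLast?_append_of_ne_nil pre (by simp)] at h
    exact h

-- skipSlash drops exactly the leading slashes of the suffix
theorem skipSlash_drop (l : List Char) : ∀ (k i : Nat), l.length - i ≤ k →
    l.drop (skipSlash l i) = (l.drop i).dropWhile (fun c => (['/'] : List Char).contains c) := by
  intro k
  induction k with
  | zero =>
    intro i hk
    rw [skipSlash]
    rw [dif_neg (by omega)]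
    rw [List.drop_eq_nil_of_le (by omega), List.dropWhile_nil]
  | succ k ih =>
    intro i hk
    rw [skipSlash]
    by_cases hcond : i < l.length ∧ l[i]? = some '/'
    · rw [dif_pos hcond]
      obtain ⟨hi, hslash⟩ := hcond
      have hdrop : l.drop i = '/' :: l.drop (i + 1) := by
        rw [List.drop_eq_getElem_cons hi]
        congr 1
        have := List.getElem?_eq_getElem hi
        rw [this] at hslash
        simpa using hslash
      rw [hdrop, List.dropWhile_cons_of_pos (by simp only [List.contains_cons, List.contains_nil, Bool.or_false]; simp)]
      exact ih (i + 1) (by omega)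
    · rw [dif_neg hcond]
      by_cases hi : i < l.length
      · have hslash : ¬ l[i]? = some '/' := fun h => hcond ⟨hi, h⟩
        have hdrop : l.drop i = l[i] :: l.drop (i + 1) := List.drop_eq_getElem_cons hi
        have hne : l[i] ≠ '/' := by
          intro he
          exact hslash (by rw [List.getElem?_eq_getElem hi, he])
        rw [hdrop, List.dropWhile_cons_of_neg (by
          simp only [List.contains_cons, List.contains_nil, Bool.or_false, beq_iff_eq]
          simpa using hne), ← hdrop]
      · rw [List.drop_eq_nil_of_le (by omega), List.dropWhile_nil]

theorem skipSlash_ge (l : List Char) : ∀ (k i : Nat), l.length - i ≤ k → i ≤ skipSlash l i := by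
  intro k
  induction k with
  | zero =>
    intro i hk
    rw [skipSlash, dif_neg (by omega)]
  | succ k ih =>
    intro i hk
    rw [skipSlash]
    by_cases hcond : i < l.length ∧ l[i]? = some '/'
    · rw [dif_pos hcond]
      have := ih (i + 1) (by omega)
      omega
    · rw [dif_neg hcond]

-- membership in the match-position list
theorem occ_mem (cleaned marker : String) (hm : marker.toList ≠ []) (i : Nat) :
    i ∈ (List.range cleaned.toList.length).filter
        (fun (i : Nat) => PySem.Str.slice cleaned (some (i : Int)) (some ((i : Int) + (marker.toList.length : Int))) == marker)
      ↔ marker.toList <+: cleaned.toList.drop i := by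
  rw [List.mem_filter, List.mem_range]
  have hslice : (PySem.Str.slice cleaned (some (i : Int)) (some ((i : Int) + (marker.toList.length : Int)))).toList
      = (cleaned.toList.drop i).take marker.toList.length := by
    simp only [PySem.Str.toList_slice, PySem.Chars.slice_eq_listSlice]
    rw [show ((i : Int) + (marker.toList.length : Int)) = ((i + marker.toList.length : Nat) : Int) by push_cast; ring]
    rw [PySem.List.slice_natCast]
    congr 1
    omega
  constructor
  · rintro ⟨hi, heq⟩
    have heq' : (PySem.Str.slice cleaned (some (i : Int)) (some ((i : Int) + (marker.toList.length : Int)))) = marker :=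
      eq_of_beq heq
    have : (cleaned.toList.drop i).take marker.toList.length = marker.toList := by
      rw [← hslice, heq']
    rw [List.prefix_iff_eq_take]
    exact this.symm
  · intro hpre
    have hlen : marker.toList.length ≤ (cleaned.toList.drop i).length := hpre.length_le
    have hi : i < cleaned.toList.length := by
      rcases Nat.lt_or_ge i cleaned.toList.length with h | h
      · exact h
      · exfalso
        rw [List.length_drop] at hlen
        have : marker.toList.length = 0 := by omega
        exact hm (List.eq_nil_of_length_eq_zero this)
    refine ⟨hi, ?_⟩
    have : (PySem.Str.slice cleaned (some (i : Int)) (some ((i : Int) + (marker.toList.length : Int)))) = marker := by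
      apply String.toList_inj.1
      rw [hslice]
      exact (List.prefix_iff_eq_take.1 hpre).symm
    exact beq_iff_eq.2 this

-- a fold step on a position below the accumulator is a no-op, so such positions can be ignored
theorem foldl_skip_all (f : Nat → Nat) : ∀ (ps : List Nat) (a : Nat), (∀ p ∈ ps, p < a) →
    ps.foldl (fun acc p => if acc ≤ p then f p else acc) a = a := by
  intro ps
  induction ps with
  | nil => intro a _; rfl
  | cons p rest ih =>
    intro a h
    have hp : p < a := h p List.mem_cons_self
    simp only [List.foldl_cons]
    rw [if_neg (by omega)]
    exact ih a (fun q hq => h q (List.mem_cons_of_mem _ hq))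

-- one round of the fold: advancing to the first admissible position
theorem foldl_round (f : Nat → Nat) : ∀ (ps : List Nat), ps.Pairwise (· < ·) →
    ∀ (q start : Nat), q ∈ ps → (∀ p ∈ ps, start ≤ p → q ≤ p) → start ≤ q → q < f q →
    ps.foldl (fun acc p => if acc ≤ p then f p else acc) start
      = ps.foldl (fun acc p => if acc ≤ p then f p else acc) (f q) := by
  intro ps
  induction ps with
  | nil => intro _ q start hq; simp at hq
  | cons p rest ih =>
    intro hpw q start hq hmin hsq hlt
    have hpw' := (List.pairwise_cons.1 hpw)
    rcases List.mem_cons.1 hq with hqp | hqrest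
    · subst hqp
      simp only [List.foldl_cons]
      rw [if_pos hsq, if_neg (by omega)]
    · have hpq : p < q := hpw'.1 q hqrest
      have hpa : p < start := by
        by_contra hge
        have := hmin p (List.mem_cons_self) (by omega)
        omega
      simp only [List.foldl_cons]
      rw [if_neg (by omega), if_neg (by omega)]
      exact ih hpw'.2 q start hqrest (fun r hr hsr => hmin r (List.mem_cons_of_mem _ hr) hsr) hsq hlt

-- MAIN: A's loop, started on the suffix at `start`, lands where B's fold lands
theorem loopA_fold (marker cleaned : String) (hm : marker.toList ≠ [])
    (hNT : cleaned.toList.getLast? ≠ some '/') :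
    ∀ (fuel start : Nat), cleaned.toList.length - start < fuel →
    (pyLoopA marker fuel (String.ofList (cleaned.toList.drop start))).toList
      = cleaned.toList.drop
          (((List.range cleaned.toList.length).filter
              (fun (i : Nat) => PySem.Str.slice cleaned (some (i : Int)) (some ((i : Int) + (marker.toList.length : Int))) == marker)).foldl
            (fun acc p => if acc ≤ p then skipSlash cleaned.toList (p + marker.toList.length) else acc) start) := by
  set l := cleaned.toList with hl
  set mk := marker.toList with hmk
  set occs := (List.range l.length).filter
      (fun (i : Nat) => PySem.Str.slice cleaned (some (i : Int)) (some ((i : Int) + (mk.length : Int))) == marker) with hoccs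
  have hocc_mem : ∀ i, i ∈ occs ↔ mk <+: l.drop i := fun i => occ_mem cleaned marker hm i
  have hsorted : occs.Pairwise (· < ·) := List.Pairwise.filter _ (List.pairwise_lt_range)
  intro fuel
  induction fuel with
  | zero => intro start h; omega
  | succ fuel ih =>
    intro start hfuel
    have hs : (String.ofList (l.drop start)).toList = l.drop start := by simp
    by_cases hinf : mk <:+: l.drop start
    · -- the marker occurs in the suffix: one loop step = one fold round
      have hwrap : PySem.Str.isIn marker ("/" ++ String.ofList (l.drop start) ++ "/") = true := by
        rw [PySem.Str.isIn_iff_infix]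
        simpa [String.toList_append, hs] using infix_wrapped hinf
      have hisin : PySem.Str.isIn marker (String.ofList (l.drop start)) = true := by
        rw [PySem.Str.isIn_iff_infix, hs]; exact hinf
      rw [pyLoopA]
      simp only [hwrap, hisin, if_true]
      rw [tail_eq _ marker hm (by rw [hs]; exact hinf)]
      -- identify the next state with a suffix of l
      have hfind0 : 0 ≤ PySem.Chars.find (l.drop start) mk := (PySem.Chars.find_nonneg_iff _ _).2 hinf
      set f := (PySem.Chars.find (l.drop start) mk).toNat with hf
      set q := start + f with hq
      obtain ⟨hqpre, hqmin⟩ := PySem.Chars.find_spec hfind0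
      have hmlen : 1 ≤ mk.length := by
        cases hx : mk with
        | nil => exact absurd hx hm
        | cons a t => simp
      have hqpre' : mk <+: l.drop q := by
        rw [hq, ← List.drop_drop]
        · exact hqpre
      have hqm_le : q + mk.length ≤ l.length := by
        have := hqpre'.length_le
        rw [List.length_drop] at this
        omega
      set start' := skipSlash l (q + mk.length) with hstart'
      have hge : q + mk.length ≤ start' := skipSlash_ge l (l.length - (q + mk.length)) _ (le_refl _)
      have hnext : PySem.Str.stripChars
          (PySem.Str.slice (String.ofList (l.drop start))
            (some (PySem.Str.find (String.ofList (l.drop start)) marker + PySem.Str.len marker)) none) "/"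
          = String.ofList (l.drop start') := by
        apply String.toList_inj.1
        rw [PySem.Str.toList_stripChars]
        have hfe : PySem.Str.find (String.ofList (l.drop start)) marker
            = PySem.Chars.find (l.drop start) mk := by simp [hmk]
        have hle : PySem.Str.len marker = (mk.length : Int) := by simp [hmk]
        rw [PySem.Str.toList_slice, hfe, hle]
        rw [PySem.Chars.slice_eq_listSlice]
        rw [PySem.List.slice_from _ (by omega)]
        have htn : (PySem.Chars.find (l.drop start) mk + (mk.length : Int)).toNat = f + mk.length := by omega
        rw [htn, hs, List.drop_drop]
        rw [show "/".toList = ['/'] from rfl]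
        rw [show start + (f + mk.length) = q + mk.length by omega]
        have hdnt : (l.drop (q + mk.length)).getLast? ≠ some '/' := getLast?_drop _ hNT
        rw [stripChars_noTrail _ hdnt]
        rw [← skipSlash_drop l (l.length - (q + mk.length)) (q + mk.length) (le_refl _)]
        rw [← hstart']
        simp
      rw [hnext]
      -- fuel bookkeeping
      have hstartlt : start < l.length := by
        by_contra hge'
        rw [List.drop_eq_nil_of_le (by omega)] at hinf
        exact hm (List.sublist_nil.1 hinf.sublist)
      rw [ih start' (by omega)]
      -- fold bookkeeping
      congr 1
      have hqmem : q ∈ occs := (hocc_mem q).2 hqpre'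
      have hqminocc : ∀ p ∈ occs, start ≤ p → q ≤ p := by
        intro p hp hsp
        by_contra hlt
        have hpq : p - start < f := by omega
        apply hqmin (p - start) hpq
        have hpre := (hocc_mem p).1 hp
        rw [List.drop_drop, show start + (p - start) = p by omega]
        exact hpre
      have hlt : q < skipSlash l (q + mk.length) := by
        rw [← hstart']
        omega
      have h2 : occs.foldl (fun acc p => if acc ≤ p then skipSlash l (p + mk.length) else acc) start
          = occs.foldl (fun acc p => if acc ≤ p then skipSlash l (p + mk.length) else acc)
              (skipSlash l (q + mk.length)) :=
        foldl_round (fun p => skipSlash l (p + mk.length)) occs hsorted q start hqmem hqminocc (by omega) hlt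
      rw [hstart']
      exact h2.symm
    · -- no marker in the suffix: the loop stops and no fold position is admissible
      have hres : pyLoopA marker (fuel + 1) (String.ofList (l.drop start)) = String.ofList (l.drop start) := by
        rw [pyLoopA]
        have hisin : PySem.Str.isIn marker (String.ofList (l.drop start)) = false := by
          rw [← Bool.not_eq_true, PySem.Str.isIn_iff_infix, hs]
          · exact hinf
        split_ifs with h1 h2
        · rw [hisin] at h2; exact absurd h2 (by simp)
        · rfl
        · rfl
      rw [hres, hs]
      congr 1
      rw [foldl_skip_all]
      intro p hp
      by_contra hge
      apply hinf
      have hpre := (hocc_mem p).1 hp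
      have h2 : mk <+: (l.drop start).drop (p - start) := by
        rw [List.drop_drop, show start + (p - start) = p by omega]
        exact hpre
      exact h2.isInfix.trans (List.drop_suffix (p - start) (l.drop start)).isInfix

theorem main_eq (path customer_login : String) :
    relative_customer_path_py path customer_login
      = relative_customer_path_py_alt path customer_login := by
  simp only [relative_customer_path_py, relative_customer_path_py_alt]
  set login := PySem.Str.stripChars customer_login "/" with hlogin
  set cleaned := PySem.Str.stripChars (PySem.Str.strip path) "/" with hcl
  set marker := "/" ++ login ++ "/" with hmk
  have hm : marker.toList ≠ [] := by
    rw [hmk]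
    simp [String.toList_append]
  have hNT : cleaned.toList.getLast? ≠ some '/' := by
    rw [hcl, PySem.Str.toList_stripChars]
    exact getLast?_stripChars _
  set occs := (List.range cleaned.toList.length).filter
      (fun (i : Nat) => PySem.Str.slice cleaned (some (i : Int)) (some ((i : Int) + (marker.toList.length : Int))) == marker) with hoccs
  set startF := occs.foldl
      (fun acc p => if acc ≤ p then skipSlash cleaned.toList (p + marker.toList.length) else acc) 0 with hstartF
  by_cases hc : cleaned = ""
  · -- A returns "" early; B's fold starts and stays at 0 on the empty string
    rw [if_pos hc]
    have hl0 : cleaned.toList = [] := by rw [hc]; rfl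
    have hoccs0 : occs = [] := by
      rw [hoccs, hl0]
      simp
    have hsf : startF = 0 := by rw [hstartF, hoccs0]; rfl
    have hslice : PySem.Str.slice cleaned (some ((0 : Nat) : Int)) none = "" := by
      apply String.toList_inj.1
      rw [PySem.Str.toList_slice, PySem.Chars.slice_eq_listSlice, PySem.List.slice_from _ (by omega), hl0]
      rfl
    rw [hsf, hslice]
    have hsw : ¬ PySem.Str.startswith "" (login ++ "/") = true := by
      intro h
      have hpx := (PySem.Chars.startswith_iff _ _).1 (by simpa using h)
      simp at hpx
    rw [if_neg hsw]
  · rw [if_neg hc]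
    have hkey : (if PySem.Str.isIn (PySem.Str.lower marker) ("/" ++ PySem.Str.lower cleaned ++ "/") = true then
          pyLoopA marker (cleaned.toList.length + 1) cleaned
        else cleaned)
        = PySem.Str.slice cleaned (some (startF : Int)) none := by
      apply String.toList_inj.1
      rw [PySem.Str.toList_slice, PySem.Chars.slice_eq_listSlice, PySem.List.slice_from _ (by omega)]
      simp only [Int.toNat_natCast]
      by_cases hg : PySem.Str.isIn (PySem.Str.lower marker) ("/" ++ PySem.Str.lower cleaned ++ "/") = true
      · rw [if_pos hg]
        have hofl : String.ofList (cleaned.toList.drop 0) = cleaned := by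
          apply String.toList_inj.1
          simp
        have := loopA_fold marker cleaned hm hNT (cleaned.toList.length + 1) 0 (by omega)
        rw [hofl] at this
        rw [this]
      · -- the case-insensitive guard failed, so the marker occurs nowhere and the fold is empty
        rw [if_neg hg]
        have hoccs0 : occs = [] := by
          rw [List.eq_nil_iff_forall_not_mem]
          intro p hp
          apply hg
          have hpre := (occ_mem cleaned marker hm p).1 hp
          rw [PySem.Str.isIn_iff_infix]
          have hinf : marker.toList <:+: cleaned.toList :=
            hpre.isInfix.trans (List.drop_suffix p cleaned.toList).isInfix
          simpa [String.toList_append, PySem.Str.toList_lower] using lower_wrapped hinf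
        have hsf : startF = 0 := by rw [hstartF, hoccs0]; rfl
        rw [hsf]
        simp
    rw [hkey]

-- ===== VERDICT (by name: the statement is the Claim_ definition above) =====
theorem relative_customer_path_py_spec : Claim_equal_relative_customer_path_py := by
  intro path customer_login _
  unfold Spec_relative_customer_path_py
  exact main_eq path customer_login
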